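-- pv_equiv track=rewrite | github.com/bdine03/Health-App | app.py | filter_ingredients_by_diet
-- ===== SOURCE A (Python) =====
-- def filter_ingredients_by_diet(ingredients, dietary_restrictions):
--     """Filter ingredients based on dietary restrictions"""
--     filtered = ingredients.copy()
--
--     if 'vegetarian' in dietary_restrictions:
--         filtered = [ing for ing in filtered if not any(meat in ing.lower() for meat in ['chicken', 'beef', 'pork', 'turkey', 'fish', 'salmon', 'tuna'])]
--
--     if 'vegan' in dietary_restrictions:
--         filtered = [ing for ing in filtered if not any(animal in ing.lower() for animal in ['chicken', 'beef', 'pork', 'turkey', 'fish', 'salmon', 'tuna', 'eggs', 'milk', 'cheese', 'yogurt'])]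
--
--     if 'gluten-free' in dietary_restrictions:
--         filtered = [ing for ing in filtered if not any(gluten in ing.lower() for gluten in ['wheat', 'bread', 'pasta', 'flour', 'barley', 'rye'])]
--
--     if 'dairy-free' in dietary_restrictions:
--         filtered = [ing for ing in filtered if not any(dairy in ing.lower() for dairy in ['milk', 'cheese', 'yogurt', 'cream', 'butter'])]
--
--     return filtered
-- ===== SOURCE B (Python) =====
-- def filter_ingredients_by_diet(ingredients, dietary_restrictions):
--     """Filter ingredients based on dietary restrictions (banned-set union, single pass)"""
--     keyword_lists = {
--         'vegetarian': ['chicken', 'beef', 'pork', 'turkey', 'fish', 'salmon', 'tuna'],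
--         'vegan': ['chicken', 'beef', 'pork', 'turkey', 'fish', 'salmon', 'tuna', 'eggs', 'milk', 'cheese', 'yogurt'],
--         'gluten-free': ['wheat', 'bread', 'pasta', 'flour', 'barley', 'rye'],
--         'dairy-free': ['milk', 'cheese', 'yogurt', 'cream', 'butter'],
--     }
--     banned = set()
--     for diet, words in keyword_lists.items():
--         if diet in dietary_restrictions:
--             banned.update(words)
--     return [ing for ing in ingredients if not any(w in ing.lower() for w in banned)]
-- ===== Notes on version B (the rewrite author's own statement) =====
-- stated objective: simpler
-- what changed: Replaces four sequential conditional filtering passes with building one banned-keyword set (union of the active restrictions' keyword lists) followed by a single filtering pass over the ingredients.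
import Mathlib
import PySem

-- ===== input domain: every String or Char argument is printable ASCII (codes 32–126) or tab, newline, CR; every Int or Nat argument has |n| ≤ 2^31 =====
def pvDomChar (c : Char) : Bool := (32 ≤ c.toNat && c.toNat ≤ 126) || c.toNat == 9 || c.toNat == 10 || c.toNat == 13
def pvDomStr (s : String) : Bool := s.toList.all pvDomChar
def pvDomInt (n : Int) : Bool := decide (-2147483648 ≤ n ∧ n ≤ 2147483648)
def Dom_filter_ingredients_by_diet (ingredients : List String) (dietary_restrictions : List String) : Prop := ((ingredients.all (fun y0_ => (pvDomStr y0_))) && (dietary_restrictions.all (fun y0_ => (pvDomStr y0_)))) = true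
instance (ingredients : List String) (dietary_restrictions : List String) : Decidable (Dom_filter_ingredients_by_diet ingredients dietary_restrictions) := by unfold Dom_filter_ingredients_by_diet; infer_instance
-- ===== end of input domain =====

-- B builds one banned-keyword set from the active restrictions and filters the ingredients in a single pass,
-- instead of A's four sequential conditional filtering passes; same return value, stated as 'simpler'.


-- ===== PORT A =====
-- 'w in ing.lower()' is PySem.Str.isIn w (PySem.Str.lower ing); exact on the ASCII domain.
def pvBad (w : String) (ing : String) : Bool := PySem.Str.isIn w (PySem.Str.lower ing)

def pvMeats : List String := ["chicken", "beef", "pork", "turkey", "fish", "salmon", "tuna"]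
def pvAnimals : List String := ["chicken", "beef", "pork", "turkey", "fish", "salmon", "tuna", "eggs", "milk", "cheese", "yogurt"]
def pvGlutens : List String := ["wheat", "bread", "pasta", "flour", "barley", "rye"]
def pvDairy : List String := ["milk", "cheese", "yogurt", "cream", "butter"]

def filter_ingredients_by_diet (ingredients : List String) (dietary_restrictions : List String) : List String :=
  let filtered := ingredients
  let filtered := if dietary_restrictions.contains "vegetarian" then
      filtered.filter (fun ing => !(pvMeats.any (fun meat => pvBad meat ing))) else filtered
  let filtered := if dietary_restrictions.contains "vegan" then
      filtered.filter (fun ing => !(pvAnimals.any (fun animal => pvBad animal ing))) else filtered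
  let filtered := if dietary_restrictions.contains "gluten-free" then
      filtered.filter (fun ing => !(pvGlutens.any (fun gluten => pvBad gluten ing))) else filtered
  let filtered := if dietary_restrictions.contains "dairy-free" then
      filtered.filter (fun ing => !(pvDairy.any (fun dairy => pvBad dairy ing))) else filtered
  filtered

-- ===== PORT B =====
-- Source B's keyword dict, in insertion order
def pvKeywordLists : List (String × List String) :=
  [("vegetarian", pvMeats), ("vegan", pvAnimals), ("gluten-free", pvGlutens), ("dairy-free", pvDairy)]

-- banned is a Python set; it is only consumed by an order-insensitive 'any', so the port is exact.
def filter_ingredients_by_diet_alt (ingredients : List String) (dietary_restrictions : List String) : List String :=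
  let banned := pvKeywordLists.foldl
    (fun banned p => if dietary_restrictions.contains p.1 then PySem.Set.update banned p.2 else banned)
    PySem.Set.empty
  ingredients.filter (fun ing => !(banned.any (fun w => pvBad w ing)))

-- ===== PRECONDITION & SPEC =====
def Spec_filter_ingredients_by_diet (ingredients : List String) (dietary_restrictions : List String) (out : List String) : Prop := out = filter_ingredients_by_diet_alt ingredients dietary_restrictions
instance (ingredients : List String) (dietary_restrictions : List String) (out : List String) : Decidable (Spec_filter_ingredients_by_diet ingredients dietary_restrictions out) := by unfold Spec_filter_ingredients_by_diet; infer_instance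

-- ===== CLAIM (what is proved, stated in full; the proofs are below) =====
def Claim_equal_filter_ingredients_by_diet : Prop := ∀ (ingredients : List String) (dietary_restrictions : List String), Dom_filter_ingredients_by_diet ingredients dietary_restrictions → Spec_filter_ingredients_by_diet ingredients dietary_restrictions (filter_ingredients_by_diet ingredients dietary_restrictions)

-- ===== LEMMAS AND PROOFS =====

-- the concatenation of the active keyword lists
def pvActive (dietary_restrictions : List String) : List String :=
  (if dietary_restrictions.contains "vegetarian" then pvMeats else []) ++
  (if dietary_restrictions.contains "vegan" then pvAnimals else []) ++
  (if dietary_restrictions.contains "gluten-free" then pvGlutens else []) ++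
  (if dietary_restrictions.contains "dairy-free" then pvDairy else [])

theorem pv_A_eq (ingredients dietary_restrictions : List String) :
    filter_ingredients_by_diet ingredients dietary_restrictions
      = ingredients.filter (fun i => !((pvActive dietary_restrictions).any (fun w => pvBad w i))) := by
  simp only [filter_ingredients_by_diet, pvActive]
  by_cases h1 : "vegetarian" ∈ dietary_restrictions <;>
  by_cases h2 : "vegan" ∈ dietary_restrictions <;>
  by_cases h3 : "gluten-free" ∈ dietary_restrictions <;>
  by_cases h4 : "dairy-free" ∈ dietary_restrictions <;>
    simp [h1, h2, h3, h4, List.filter_filter, List.append_assoc, List.any_append, Bool.not_or, Bool.and_comm, Bool.and_left_comm, Bool.and_assoc]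

-- B's banned set has exactly the members of the concatenation of the active keyword lists
theorem pv_banned_mem (dietary_restrictions : List String) (x : String) :
    (x ∈ pvKeywordLists.foldl
        (fun banned p => if dietary_restrictions.contains p.1 then PySem.Set.update banned p.2 else banned)
        PySem.Set.empty)
      ↔ x ∈ pvActive dietary_restrictions := by
  simp only [pvKeywordLists, List.foldl_cons, List.foldl_nil, pvActive]
  by_cases h1 : "vegetarian" ∈ dietary_restrictions <;>
  by_cases h2 : "vegan" ∈ dietary_restrictions <;>
  by_cases h3 : "gluten-free" ∈ dietary_restrictions <;>
  by_cases h4 : "dairy-free" ∈ dietary_restrictions <;>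
    simp [h1, h2, h3, h4, PySem.Set.mem_update, PySem.Set.empty] <;> tauto

theorem filter_ingredients_by_diet_spec' (ingredients dietary_restrictions : List String) :
    filter_ingredients_by_diet ingredients dietary_restrictions
      = filter_ingredients_by_diet_alt ingredients dietary_restrictions := by
  rw [pv_A_eq]
  unfold filter_ingredients_by_diet_alt
  apply List.filter_congr
  intro i _
  congr 1
  rw [Bool.eq_iff_iff]
  simp only [List.any_eq_true]
  constructor
  · rintro ⟨w, hw, hb⟩; exact ⟨w, (pv_banned_mem dietary_restrictions w).2 hw, hb⟩
  · rintro ⟨w, hw, hb⟩; exact ⟨w, (pv_banned_mem dietary_restrictions w).1 hw, hb⟩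

-- ===== VERDICT (by name: the statement is the Claim_ definition above) =====
theorem filter_ingredients_by_diet_spec : Claim_equal_filter_ingredients_by_diet := by
  intro ingredients dietary_restrictions _
  exact filter_ingredients_by_diet_spec' ingredients dietary_restrictions
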